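-- pv_equiv track=rewrite | github.com/mohamedsemah/Infotainment-A11y | backend/app/services/analysis_service.py | _categorize_by_pour
-- ===== SOURCE A (Python) =====
-- from typing import List, Dict, Any, Optional
--
-- def _categorize_by_pour(issues: List[Dict[str, Any]]) -> Dict[str, List[Dict[str, Any]]]:
--     """Categorize issues by POUR principle."""
--     categorized = {
--         "perceivable": [],
--         "operable": [],
--         "understandable": [],
--         "robust": []
--     }
--
--     for issue in issues:
--         pour_principle = issue.get("pour_principle", "unknown").lower()
--         if pour_principle in categorized:
--             categorized[pour_principle].append(issue)
--
--     return categorized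
-- ===== SOURCE B (Python) =====
-- def _categorize_by_pour(issues):
--     """Categorize issues by POUR principle."""
--     return {
--         key: [i for i in issues
--               if i.get("pour_principle", "unknown").lower() == key]
--         for key in ["perceivable", "operable", "understandable", "robust"]
--     }
-- ===== Notes on version B (the rewrite author's own statement) =====
-- stated objective: simpler
-- what changed: Replaced the single dispatching pass that appends into a pre-built mutable dict with a dict comprehension over the four fixed POUR keys, each bucket computed by an independent filtering pass over issues.
import Mathlib
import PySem

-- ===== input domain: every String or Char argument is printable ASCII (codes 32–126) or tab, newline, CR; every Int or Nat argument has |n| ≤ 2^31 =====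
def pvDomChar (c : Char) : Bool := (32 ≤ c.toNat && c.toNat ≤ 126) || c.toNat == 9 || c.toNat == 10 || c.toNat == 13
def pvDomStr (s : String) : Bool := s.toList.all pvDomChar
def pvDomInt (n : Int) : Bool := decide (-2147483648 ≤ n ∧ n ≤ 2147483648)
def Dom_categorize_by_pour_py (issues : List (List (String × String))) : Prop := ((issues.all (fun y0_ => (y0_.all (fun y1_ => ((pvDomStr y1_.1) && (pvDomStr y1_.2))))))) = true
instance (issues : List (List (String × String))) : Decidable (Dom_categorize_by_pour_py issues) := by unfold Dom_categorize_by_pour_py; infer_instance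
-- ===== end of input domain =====

-- B replaces A's single dispatching pass into a pre-built mutable dict by a dict
-- comprehension over the four fixed POUR keys, each bucket an independent filter
-- over issues (objective: simpler).

-- ===== PORT A =====
-- loop body of A's for-loop, named so the proofs can speak about it
def pourStepA (cat : PySem.Dict String (List (List (String × String))))
    (issue : List (String × String)) : PySem.Dict String (List (List (String × String))) :=
  let pour_principle := PySem.Str.lower (PySem.Dict.getD (PySem.Dict.mk issue) "pour_principle" "unknown")
  if cat.contains pour_principle then cat.modify pour_principle [] (fun l => l ++ [issue]) else cat

def categorize_by_pour_py (issues : List (List (String × String))) : List (String × List (List (String × String))) :=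
  (issues.foldl pourStepA
    (PySem.Dict.mk [("perceivable", []), ("operable", []), ("understandable", []), ("robust", [])])).items

-- ===== PORT B =====
def categorize_by_pour_py_alt (issues : List (List (String × String))) : List (String × List (List (String × String))) :=
  ["perceivable", "operable", "understandable", "robust"].map
    (fun key => (key, issues.filter
      (fun i => PySem.Str.lower (PySem.Dict.getD (PySem.Dict.mk i) "pour_principle" "unknown") == key)))

-- ===== PRECONDITION & SPEC =====
def Spec_categorize_by_pour_py (issues : List (List (String × String))) (out : List (String × List (List (String × String)))) : Prop := out = categorize_by_pour_py_alt issues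
instance (issues : List (List (String × String))) (out : List (String × List (List (String × String)))) : Decidable (Spec_categorize_by_pour_py issues out) := by unfold Spec_categorize_by_pour_py; infer_instance

-- ===== CLAIM (what is proved, stated in full; the proofs are below) =====
def Claim_equal_categorize_by_pour_py : Prop := ∀ (issues : List (List (String × String))), Dom_categorize_by_pour_py issues → Spec_categorize_by_pour_py issues (categorize_by_pour_py issues)

-- ===== LEMMAS AND PROOFS =====

-- the key A and B both extract from an issue
def pourKey (i : List (String × String)) : String :=
  PySem.Str.lower (PySem.Dict.getD (PySem.Dict.mk i) "pour_principle" "unknown")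

-- loop invariant: folding A's step over any issue list, starting from the
-- four-bucket literal dict, appends to each bucket exactly the filtered issues
theorem pourStepA_eq (cat : PySem.Dict String (List (List (String × String))))
    (i : List (String × String)) :
    pourStepA cat i =
      if cat.contains (pourKey i) then cat.modify (pourKey i) [] (fun l => l ++ [i]) else cat := rfl

-- loop invariant: folding A's step over any issue list, starting from the
-- four-bucket literal dict, appends to each bucket exactly the filtered issues
theorem pour_loop_inv (l : List (List (String × String)))
    (b1 b2 b3 b4 : List (List (String × String))) :
    l.foldl pourStepA
      (PySem.Dict.mk [("perceivable", b1), ("operable", b2), ("understandable", b3), ("robust", b4)]) =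
    PySem.Dict.mk
      [("perceivable", b1 ++ l.filter (fun i => pourKey i == "perceivable")),
       ("operable", b2 ++ l.filter (fun i => pourKey i == "operable")),
       ("understandable", b3 ++ l.filter (fun i => pourKey i == "understandable")),
       ("robust", b4 ++ l.filter (fun i => pourKey i == "robust"))] := by
  induction l generalizing b1 b2 b3 b4 with
  | nil => simp
  | cons i t ih =>
    rw [List.foldl_cons, pourStepA_eq, List.filter_cons, List.filter_cons, List.filter_cons,
      List.filter_cons]
    by_cases h1 : pourKey i = "perceivable"
    · rw [h1]
      rw [show (if (PySem.Dict.mk [("perceivable", b1), ("operable", b2), ("understandable", b3), ("robust", b4)]).contains "perceivable" then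
            (PySem.Dict.mk [("perceivable", b1), ("operable", b2), ("understandable", b3), ("robust", b4)]).modify "perceivable" [] (fun l => l ++ [i])
          else PySem.Dict.mk [("perceivable", b1), ("operable", b2), ("understandable", b3), ("robust", b4)])
          = PySem.Dict.mk [("perceivable", b1 ++ [i]), ("operable", b2), ("understandable", b3), ("robust", b4)] by
        simp [PySem.Dict.contains, PySem.Dict.modify, PySem.Dict.insert, PySem.Dict.getD,
          PySem.Dict.get?]]
      rw [ih]
      simp
    by_cases h2 : pourKey i = "operable"
    · rw [h2]
      rw [show (if (PySem.Dict.mk [("perceivable", b1), ("operable", b2), ("understandable", b3), ("robust", b4)]).contains "operable" then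
            (PySem.Dict.mk [("perceivable", b1), ("operable", b2), ("understandable", b3), ("robust", b4)]).modify "operable" [] (fun l => l ++ [i])
          else PySem.Dict.mk [("perceivable", b1), ("operable", b2), ("understandable", b3), ("robust", b4)])
          = PySem.Dict.mk [("perceivable", b1), ("operable", b2 ++ [i]), ("understandable", b3), ("robust", b4)] by
        simp [PySem.Dict.contains, PySem.Dict.modify, PySem.Dict.insert, PySem.Dict.getD,
          PySem.Dict.get?]]
      rw [ih]
      simp
    by_cases h3 : pourKey i = "understandable"
    · rw [h3]
      rw [show (if (PySem.Dict.mk [("perceivable", b1), ("operable", b2), ("understandable", b3), ("robust", b4)]).contains "understandable" then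
            (PySem.Dict.mk [("perceivable", b1), ("operable", b2), ("understandable", b3), ("robust", b4)]).modify "understandable" [] (fun l => l ++ [i])
          else PySem.Dict.mk [("perceivable", b1), ("operable", b2), ("understandable", b3), ("robust", b4)])
          = PySem.Dict.mk [("perceivable", b1), ("operable", b2), ("understandable", b3 ++ [i]), ("robust", b4)] by
        simp [PySem.Dict.contains, PySem.Dict.modify, PySem.Dict.insert, PySem.Dict.getD,
          PySem.Dict.get?]]
      rw [ih]
      simp [h1]
    by_cases h4 : pourKey i = "robust"
    · rw [h4]
      rw [show (if (PySem.Dict.mk [("perceivable", b1), ("operable", b2), ("understandable", b3), ("robust", b4)]).contains "robust" then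
            (PySem.Dict.mk [("perceivable", b1), ("operable", b2), ("understandable", b3), ("robust", b4)]).modify "robust" [] (fun l => l ++ [i])
          else PySem.Dict.mk [("perceivable", b1), ("operable", b2), ("understandable", b3), ("robust", b4)])
          = PySem.Dict.mk [("perceivable", b1), ("operable", b2), ("understandable", b3), ("robust", b4 ++ [i])] by
        simp [PySem.Dict.contains, PySem.Dict.modify, PySem.Dict.insert, PySem.Dict.getD,
          PySem.Dict.get?]]
      rw [ih]
      simp [h1, h2]
    · rw [show (PySem.Dict.mk [("perceivable", b1), ("operable", b2), ("understandable", b3), ("robust", b4)]).contains (pourKey i) = false by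
        simp [PySem.Dict.contains, PySem.Dict.keys, h1, h2, h3, h4, Ne.symm h1, Ne.symm h2,
          Ne.symm h3, Ne.symm h4]]
      rw [if_neg (by simp), ih]
      simp [h1, h2, h3, h4]

-- ===== VERDICT (by name: the statement is the Claim_ definition above) =====
theorem categorize_by_pour_py_spec : Claim_equal_categorize_by_pour_py := by
  intro issues _
  show _ = _
  simp [categorize_by_pour_py, categorize_by_pour_py_alt, pour_loop_inv, pourKey]
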